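-- pv_equiv track=rewrite | github.com/cutecryptid/minish-hat | hybrid-minterms.py | totalize
-- ===== SOURCE A (Python) =====
-- from itertools import product
--
-- def totalize(s):
--     keyletters = '21'
--     seq = list(s)
--     indices = [ i for i, c in enumerate(seq) if c in keyletters ]
--     ret = []
--     for t in product(keyletters, repeat=len(indices)):
--         for i, c in zip(indices, t):
--             seq[i] = c
--         ret += [''.join(seq)]
--     return ret
-- ===== SOURCE B (Python) =====
-- def totalize(s):
--     results = [[]]
--     for c in s:
--         if c in '21':
--             forked = []
--             for r in results:
--                 r2 = r.copy()
--                 r.append('2')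
--                 r2.append('1')
--                 forked.append(r)
--                 forked.append(r2)
--             results = forked
--         else:
--             for r in results:
--                 r.append(c)
--     return [''.join(r) for r in results]
-- ===== Notes on version B (the rewrite author's own statement) =====
-- stated objective: alternative
-- what changed: B builds the results incrementally left-to-right, extending every current prefix with each character and forking ('2' before '1') at flexible positions, instead of A's flexible-index list plus an itertools.product Cartesian product written into a shared mutated buffer.
import Mathlib
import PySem

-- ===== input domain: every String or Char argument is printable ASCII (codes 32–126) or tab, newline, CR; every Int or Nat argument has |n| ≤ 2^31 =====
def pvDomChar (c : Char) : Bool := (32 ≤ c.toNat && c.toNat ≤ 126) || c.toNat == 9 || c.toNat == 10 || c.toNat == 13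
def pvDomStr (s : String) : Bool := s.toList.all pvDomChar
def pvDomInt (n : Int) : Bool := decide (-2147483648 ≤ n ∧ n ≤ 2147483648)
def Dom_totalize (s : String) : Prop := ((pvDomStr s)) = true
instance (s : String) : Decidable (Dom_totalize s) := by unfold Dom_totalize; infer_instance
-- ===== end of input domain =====

-- B builds the result list incrementally (each '2'/'1' character doubles a list of prefixes)
-- instead of A's index list + itertools.product + shared mutated buffer; same cost, plainer structure.

-- ===== PORT A =====

-- 'c in "21"' for a single character c (c is always one character of s, so substring test = char test)
def pvFlex (c : Char) : Bool := c == '2' || c == '1'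

-- itertools.product('21', repeat=n), in product's order (first coordinate varies slowest)
def pvProd : Nat → List (List Char)
  | 0 => [[]]
  | n + 1 => ['2', '1'].flatMap (fun c => (pvProd n).map (fun t => c :: t))

-- 'for i, c in zip(indices, t): seq[i] = c'  (indices are the nonnegative enumerate indices,
-- so .toNat is exact, and every assignment is in range)
def pvAssign (sq : List Char) (pairs : List (Int × Char)) : List Char :=
  pairs.foldl (fun sq p => sq.set p.1.toNat p.2) sq

def totalize (s : String) : List String :=
  let seq := s.toList
  let indices := ((PySem.List.enumerate seq 0).filter (fun p => pvFlex p.2)).map (fun p => p.1)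
  let r := (pvProd indices.length).foldl
    (fun (st : List Char × List String) t =>
      let sq := pvAssign st.1 (indices.zip t)
      (sq, st.2 ++ [String.mk sq]))   -- ret += [''.join(seq)]
    (seq, [])
  r.2

-- ===== PORT B =====
def totalize_alt (s : String) : List String :=
  (s.toList.foldl
    (fun results c =>
      if pvFlex c then results.flatMap (fun r => [r ++ ['2'], r ++ ['1']])
      else results.map (fun r => r ++ [c]))
    [[]]).map String.mk

-- ===== PRECONDITION & SPEC =====
def Spec_totalize (s : String) (out : List String) : Prop := out = totalize_alt s
instance (s : String) (out : List String) : Decidable (Spec_totalize s out) := by unfold Spec_totalize; infer_instance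

-- ===== CLAIM (what is proved, stated in full; the proofs are below) =====
def Claim_equal_totalize : Prop := ∀ (s : String), Dom_totalize s → Spec_totalize s (totalize s)

-- ===== LEMMAS AND PROOFS =====

-- the list of flexible positions, structurally
def pvIdx : List Char → List Nat
  | [] => []
  | c :: cs => if pvFlex c then 0 :: (pvIdx cs).map (· + 1) else (pvIdx cs).map (· + 1)

-- the common specification: all substitutions, leftmost position slowest, '2' before '1'
def pvExpand : List Char → List (List Char)
  | [] => [[]]
  | c :: cs =>
    if pvFlex c then ['2', '1'].flatMap (fun d => (pvExpand cs).map (fun e => d :: e))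
    else (pvExpand cs).map (fun e => c :: e)

-- Nat-indexed assignment
def pvAssignN (sq : List Char) (pairs : List (Nat × Char)) : List Char :=
  pairs.foldl (fun sq p => sq.set p.1 p.2) sq

theorem pvMapShift (l : List Nat) (s : Int) :
    (l.map (· + 1)).map (fun (n : Nat) => s + (n : Int)) = l.map (fun (n : Nat) => (s + 1) + (n : Int)) := by
  rw [List.map_map]
  apply List.map_congr_left
  intro n _
  simp only [Function.comp_apply]
  push_cast
  ring

theorem pvIdx_enum (cs : List Char) : ∀ s : Int,
    ((PySem.List.enumerate cs s).filter (fun p => pvFlex p.2)).map (fun p => p.1)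
      = (pvIdx cs).map (fun (n : Nat) => s + (n : Int)) := by
  induction cs with
  | nil => intro s; simp [PySem.List.enumerate_nil, pvIdx]
  | cons c cs ih =>
    intro s
    rw [PySem.List.enumerate_cons, List.filter_cons]
    by_cases h : pvFlex c
    · simp only [pvIdx, h, if_true, List.map_cons, ih (s + 1), pvMapShift]
      simp
    · simp only [pvIdx, h, Bool.false_eq_true, if_false, ih (s + 1), pvMapShift]

theorem pvAssign_eq_assignN (sq : List Char) (idx : List Nat) (t : List Char) :
    pvAssign sq ((idx.map (fun (n : Nat) => (n : Int))).zip t) = pvAssignN sq (idx.zip t) := by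
  rw [List.zip_map_left]
  unfold pvAssign pvAssignN
  rw [List.foldl_map]
  apply PySem.List.foldl_congr_mem
  intro acc p _
  simp

theorem pvAssignN_shift (a : Char) (l : List Char) (pairs : List (Nat × Char)) :
    pvAssignN (a :: l) (pairs.map (fun p => (p.1 + 1, p.2))) = a :: pvAssignN l pairs := by
  induction pairs generalizing l with
  | nil => rfl
  | cons p ps ih => simpa [pvAssignN] using ih (l.set p.1 p.2)

theorem pvAssignN_cons_zero (c t0 : Char) (cs : List Char) (ps : List (Nat × Char)) :
    pvAssignN (c :: cs) ((0, t0) :: ps) = pvAssignN (t0 :: cs) ps := rfl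

theorem pvZip_shift (idx : List Nat) (t : List Char) :
    ((idx.map (· + 1)).zip t) = (idx.zip t).map (fun p => (p.1 + 1, p.2)) := by
  rw [List.zip_map_left]; rfl

theorem pvProd_length {n : Nat} {t : List Char} (h : t ∈ pvProd n) : t.length = n := by
  induction n generalizing t with
  | zero => simp [pvProd] at h; simp [h]
  | succ n ih =>
    simp only [pvProd, List.mem_flatMap, List.mem_map] at h
    obtain ⟨c, _, t', ht', rfl⟩ := h
    simp [ih ht']

-- re-assigning all flexible positions overwrites any previous assignment of them
theorem pvOverwrite (cs : List Char) : ∀ u t : List Char,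
    u.length = (pvIdx cs).length → t.length = (pvIdx cs).length →
    pvAssignN (pvAssignN cs ((pvIdx cs).zip u)) ((pvIdx cs).zip t)
      = pvAssignN cs ((pvIdx cs).zip t) := by
  induction cs with
  | nil => intro u t _ _; simp [pvIdx, pvAssignN]
  | cons c cs ih =>
    intro u t hu ht
    by_cases h : pvFlex c
    · simp only [pvIdx, h, if_true] at hu ht ⊢
      match u, t with
      | u0 :: u', t0 :: t' =>
        simp only [List.length_cons, List.length_map, Nat.succ.injEq] at hu ht
        simp only [List.zip_cons_cons, pvZip_shift, pvAssignN_cons_zero, pvAssignN_shift]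
        rw [ih u' t' (by simpa using hu) (by simpa using ht)]
    · simp only [pvIdx, h, Bool.false_eq_true, if_false, List.length_map] at hu ht ⊢
      simp only [pvZip_shift, pvAssignN_shift]
      rw [ih u t (by simpa using hu) (by simpa using ht)]

-- the product loop body, as a function of the product tuple only
theorem pvKey (cs : List Char) :
    (pvProd (pvIdx cs).length).map (fun t => pvAssignN cs ((pvIdx cs).zip t)) = pvExpand cs := by
  induction cs with
  | nil => simp [pvIdx, pvProd, pvExpand, pvAssignN]
  | cons c cs ih =>
    by_cases h : pvFlex c
    · simp only [pvIdx, pvExpand, h, if_true, List.length_cons, List.length_map, pvProd,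
        List.map_flatMap]
      apply List.flatMap_congr
      intro d _
      rw [← ih, List.map_map, List.map_map]
      apply List.map_congr_left
      intro t _
      simp only [Function.comp_apply, List.zip_cons_cons, pvZip_shift, pvAssignN_cons_zero,
        pvAssignN_shift]
    · simp only [pvIdx, pvExpand, h, Bool.false_eq_true, if_false, List.length_map]
      rw [← ih, List.map_map]
      apply List.map_congr_left
      intro t _
      simp only [Function.comp_apply, pvZip_shift, pvAssignN_shift]

-- unrolling A's foldl: the carried buffer never leaks into later outputs
theorem pvLoopA (idx : List Nat) (f : List Char → List Char)
    (ts : List (List Char)) : ∀ (sq : List Char) (acc : List String),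
    (∀ t ∈ ts, pvAssignN sq (idx.zip t) = f t) →
    (∀ u ∈ ts, ∀ t ∈ ts, pvAssignN (f u) (idx.zip t) = f t) →
    (ts.foldl (fun (st : List Char × List String) t =>
        let sq := pvAssignN st.1 (idx.zip t)
        (sq, st.2 ++ [String.mk sq])) (sq, acc)).2
      = acc ++ ts.map (fun t => String.mk (f t)) := by
  induction ts with
  | nil => intro sq acc _ _; simp
  | cons t0 ts ih =>
    intro sq acc h1 h2
    simp only [List.foldl_cons]
    rw [h1 t0 (List.mem_cons_self)]
    rw [ih (f t0) (acc ++ [String.mk (f t0)])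
      (fun t ht => h2 t0 List.mem_cons_self t (List.mem_cons_of_mem _ ht))
      (fun u hu t ht => h2 u (List.mem_cons_of_mem _ hu) t (List.mem_cons_of_mem _ ht))]
    simp

theorem totalize_eq_expand (s : String) :
    totalize s = (pvExpand s.toList).map String.mk := by
  unfold totalize
  dsimp only
  set cs := s.toList with hcs
  have hidx : ((PySem.List.enumerate cs 0).filter (fun p => pvFlex p.2)).map (fun p => p.1)
      = (pvIdx cs).map (fun (n : Nat) => (n : Int)) := by
    rw [pvIdx_enum cs 0]
    apply List.map_congr_left
    intro n _
    simp
  rw [hidx]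
  have hlen : ((pvIdx cs).map (fun (n : Nat) => (n : Int))).length = (pvIdx cs).length := by simp
  rw [hlen]
  have hcongr : (pvProd (pvIdx cs).length).foldl
      (fun (st : List Char × List String) t =>
        let sq := pvAssign st.1 (((pvIdx cs).map (fun (n : Nat) => (n : Int))).zip t)
        (sq, st.2 ++ [String.mk sq])) (cs, [])
    = (pvProd (pvIdx cs).length).foldl
      (fun (st : List Char × List String) t =>
        let sq := pvAssignN st.1 ((pvIdx cs).zip t)
        (sq, st.2 ++ [String.mk sq])) (cs, []) := by
    apply PySem.List.foldl_congr_mem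
    intro st t _
    simp only [pvAssign_eq_assignN]
  rw [hcongr]
  rw [pvLoopA (pvIdx cs) (fun t => pvAssignN cs ((pvIdx cs).zip t))
    (pvProd (pvIdx cs).length) cs []
    (fun t _ => rfl)
    (fun u hu t ht => pvOverwrite cs u t (pvProd_length hu) (pvProd_length ht))]
  rw [List.nil_append, ← pvKey cs, List.map_map]
  rfl

-- B's fold in terms of pvExpand
theorem pvLoopB (cs : List Char) : ∀ R : List (List Char),
    cs.foldl (fun results c =>
        if pvFlex c then results.flatMap (fun r => [r ++ ['2'], r ++ ['1']])
        else results.map (fun r => r ++ [c])) R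
      = R.flatMap (fun r => (pvExpand cs).map (fun e => r ++ e)) := by
  induction cs with
  | nil => intro R; simp [pvExpand]
  | cons c cs ih =>
    intro R
    by_cases h : pvFlex c
    · simp only [List.foldl_cons, h, if_true, ih, pvExpand]
      rw [List.flatMap_assoc]
      apply List.flatMap_congr
      intro r _
      simp [List.map_map, Function.comp_def, List.append_assoc]
    · simp only [List.foldl_cons, h, Bool.false_eq_true, if_false, ih, pvExpand]
      rw [List.flatMap_map]
      apply List.flatMap_congr
      intro r _
      rw [List.map_map]
      apply List.map_congr_left
      intro e _
      simp

theorem totalize_alt_eq_expand (s : String) :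
    totalize_alt s = (pvExpand s.toList).map String.mk := by
  unfold totalize_alt
  rw [pvLoopB s.toList [[]]]
  simp

-- ===== VERDICT (by name: the statement is the Claim_ definition above) =====
theorem totalize_spec : Claim_equal_totalize := by
  intro s _
  unfold Spec_totalize
  rw [totalize_eq_expand, totalize_alt_eq_expand]
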